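-- pv_equiv track=rewrite | github.com/zoltanf/mondo | scripts/generate_output_contract_matrix.py | skip_parens
-- ===== SOURCE A (Python) =====
-- def skip_parens(s: str, i: int) -> int:
--     if i >= len(s) or s[i] != "(":
--         return i
--     depth = 0
--     while i < len(s):
--         ch = s[i]
--         if ch == "(":
--             depth += 1
--         elif ch == ")":
--             depth -= 1
--             if depth == 0:
--                 return i + 1
--         i += 1
--     return i
-- ===== SOURCE B (Python) =====
-- def skip_parens(s: str, i: int) -> int:
--     # Recursive decomposition: skip each nested group by a recursive call
--     # instead of tracking a depth counter in a flat scan.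
--     if i >= len(s) or s[i] != "(":
--         return i
--     j = i + 1
--     while j < len(s):
--         ch = s[j]
--         if ch == ")":
--             return j + 1
--         if ch == "(":
--             j = skip_parens(s, j)
--         else:
--             j += 1
--     return j
-- ===== Notes on version B (the rewrite author's own statement) =====
-- stated objective: alternative
-- what changed: Replaces the flat scan with a depth counter by recursion over the nested parenthesis structure: the loop skips each inner group with a recursive call and returns right after the first top-level ')'.
import Mathlib
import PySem

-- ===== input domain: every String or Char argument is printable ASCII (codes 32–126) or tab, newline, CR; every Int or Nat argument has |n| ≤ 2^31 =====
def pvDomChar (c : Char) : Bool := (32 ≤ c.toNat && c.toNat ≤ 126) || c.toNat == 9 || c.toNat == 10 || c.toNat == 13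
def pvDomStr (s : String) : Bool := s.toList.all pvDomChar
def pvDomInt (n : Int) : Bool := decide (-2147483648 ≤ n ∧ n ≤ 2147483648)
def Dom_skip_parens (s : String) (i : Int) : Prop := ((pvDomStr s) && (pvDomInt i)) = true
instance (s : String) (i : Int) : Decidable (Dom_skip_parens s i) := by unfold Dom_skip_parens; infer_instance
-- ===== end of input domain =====

-- B replaces A's flat depth-counter scan by recursion over the nested parenthesis
-- structure (a recursive call skips each inner group); same return value, different decomposition.

-- ===== PORT A =====
-- the while loop of A: i is the scan index, depth the open-paren counter
def pvALoop (cs : List Char) (i depth : Int) : Int :=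
  if _h : i < (cs.length : Int) then
    match PySem.List.pyGet? cs i with
    | some '(' => pvALoop cs (i + 1) (depth + 1)
    | some ')' => if depth - 1 = 0 then i + 1 else pvALoop cs (i + 1) (depth - 1)
    | _ => pvALoop cs (i + 1) depth   -- none = IndexError in Python (excluded by Pre_); junk: continue
  else i
termination_by (cs.length - i).toNat
decreasing_by all_goals omega

def skip_parens (s : String) (i : Int) : Int :=
  let cs := s.toList
  if (cs.length : Int) ≤ i then i
  else
    match PySem.List.pyGet? cs i with
    | some '(' => pvALoop cs i 0
    | _ => i     -- s[i] ≠ '(' → return i; none = IndexError (excluded by Pre_), junk: i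

-- ===== PORT B =====
-- Source B's recursion made total with fuel (one unit per call; the top level supplies
-- provably enough, see lemma pvAltLoop_eq below); structure mirrors Source B exactly.
mutual
def pvAltGo (cs : List Char) : Nat → Int → Int
  | 0, i => i                     -- fuel exhaustion: unreachable from the top-level call
  | fuel + 1, i =>
    if (cs.length : Int) ≤ i then i
    else
      match PySem.List.pyGet? cs i with
      | some '(' => pvAltLoop cs fuel (i + 1)
      | _ => i

def pvAltLoop (cs : List Char) : Nat → Int → Int
  | 0, j => j                     -- fuel exhaustion: unreachable from the top-level call
  | fuel + 1, j =>
    if j < (cs.length : Int) then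
      match PySem.List.pyGet? cs j with
      | some ')' => j + 1
      | some '(' => pvAltLoop cs fuel (pvAltGo cs fuel j)
      | _ => pvAltLoop cs fuel (j + 1)
    else j
end

def skip_parens_alt (s : String) (i : Int) : Int :=
  let cs := s.toList
  pvAltGo cs (4 * cs.length + 8) i

-- ===== PRECONDITION & SPEC =====
-- Pre_ excludes exactly the inputs with i < -len(s) (and i < len(s)) on which Python's
-- s[i] raises IndexError in both A and B; A (and B) return on every admitted input.
def Pre_skip_parens (s : String) (i : Int) : Prop := -(PySem.Str.len s) ≤ i
instance (s : String) (i : Int) : Decidable (Pre_skip_parens s i) := by unfold Pre_skip_parens; infer_instance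

def pvWitness_skip_parens : String × Int := ("(a(b))c", 0)

def Spec_skip_parens (s : String) (i : Int) (out : Int) : Prop := out = skip_parens_alt s i
instance (s : String) (i : Int) (out : Int) : Decidable (Spec_skip_parens s i out) := by unfold Spec_skip_parens; infer_instance

-- ===== CLAIM (what is proved, stated in full; the proofs are below) =====
def Claim_equal_skip_parens : Prop := ∀ (s : String) (i : Int), Dom_skip_parens s i → Pre_skip_parens s i → Spec_skip_parens s i (skip_parens s i)

-- ===== LEMMAS AND PROOFS =====

theorem pvALoop_stop (cs : List Char) (j d : Int) (hj : ¬ j < (cs.length : Int)) :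
    pvALoop cs j d = j := by
  rw [pvALoop]; simp [hj]

theorem pvALoop_step (cs : List Char) (j d : Int) (hj : j < (cs.length : Int)) :
    pvALoop cs j d =
      if PySem.List.pyGet? cs j = some '(' then pvALoop cs (j + 1) (d + 1)
      else if PySem.List.pyGet? cs j = some ')' then
        (if d - 1 = 0 then j + 1 else pvALoop cs (j + 1) (d - 1))
      else pvALoop cs (j + 1) d := by
  rw [pvALoop]
  simp only [hj, dite_true]
  split
  · rename_i heq; simp [heq]
  · rename_i heq; simp [heq]
  · rename_i h1 h2
    rw [if_neg, if_neg] <;> simp_all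

theorem pvAltGo_step (cs : List Char) (fuel : Nat) (i : Int) :
    pvAltGo cs (fuel + 1) i =
      if (cs.length : Int) ≤ i then i
      else if PySem.List.pyGet? cs i = some '(' then pvAltLoop cs fuel (i + 1)
      else i := by
  rw [pvAltGo]
  split
  · rfl
  · split
    · rename_i heq; simp [heq]
    · rename_i h1
      rw [if_neg]
      simp_all

theorem pvAltLoop_step (cs : List Char) (fuel : Nat) (j : Int) :
    pvAltLoop cs (fuel + 1) j =
      if j < (cs.length : Int) then
        (if PySem.List.pyGet? cs j = some ')' then j + 1
         else if PySem.List.pyGet? cs j = some '(' then pvAltLoop cs fuel (pvAltGo cs fuel j)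
         else pvAltLoop cs fuel (j + 1))
      else j := by
  rw [pvAltLoop]
  split
  · split
    · rename_i heq; simp [heq]
    · rename_i heq; simp [heq]
    · rename_i h1 h2
      rw [if_neg, if_neg] <;> simp_all
  · rfl

-- A's loop never moves backwards
theorem pvALoop_ge (cs : List Char) (n : Nat) :
    ∀ (j d : Int), (↑cs.length - j).toNat ≤ n → j ≤ pvALoop cs j d := by
  induction n with
  | zero =>
    intro j d h
    rw [pvALoop_stop cs j d (by omega)]
  | succ n ih =>
    intro j d h
    by_cases hj : j < (cs.length : Int)
    · have h1 : (↑cs.length - (j + 1)).toNat ≤ n := by omega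
      rw [pvALoop_step cs j d hj]
      split
      · exact le_trans (by omega) (ih (j + 1) (d + 1) h1)
      · split
        · split
          · omega
          · exact le_trans (by omega) (ih (j + 1) (d - 1) h1)
        · exact le_trans (by omega) (ih (j + 1) d h1)
    · rw [pvALoop_stop cs j d hj]

theorem pvALoop_ge' (cs : List Char) (j d : Int) : j ≤ pvALoop cs j d :=
  pvALoop_ge cs (↑cs.length - j).toNat j d (le_refl _)

-- the depth counter decomposes: skipping at depth d+1 = skip one balanced group, then depth d
theorem pvALoop_key (cs : List Char) (n : Nat) :
    ∀ (j d : Int), (↑cs.length - j).toNat ≤ n → 1 ≤ d →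
      pvALoop cs j (d + 1) = pvALoop cs (pvALoop cs j 1) d := by
  induction n with
  | zero =>
    intro j d h _
    have hj : ¬ j < (cs.length : Int) := by omega
    rw [pvALoop_stop cs j (d + 1) hj, pvALoop_stop cs j 1 hj, pvALoop_stop cs j d hj]
  | succ n ih =>
    intro j d h hd
    by_cases hj : j < (cs.length : Int)
    · have h1 : (↑cs.length - (j + 1)).toNat ≤ n := by omega
      rw [pvALoop_step cs j (d + 1) hj]
      conv_rhs => rw [pvALoop_step cs j 1 hj]
      by_cases hc1 : PySem.List.pyGet? cs j = some '('
      · rw [if_pos hc1, if_pos hc1]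
        have e3 : pvALoop cs (j + 1) (1 + 1) = pvALoop cs (pvALoop cs (j + 1) 1) 1 :=
          ih (j + 1) 1 h1 (by omega)
        rw [e3]
        have e1 : pvALoop cs (j + 1) (d + 1 + 1) = pvALoop cs (pvALoop cs (j + 1) 1) (d + 1) :=
          ih (j + 1) (d + 1) h1 (by omega)
        rw [e1]
        have hk : j + 1 ≤ pvALoop cs (j + 1) 1 := pvALoop_ge' cs (j + 1) 1
        exact ih (pvALoop cs (j + 1) 1) d (by omega) hd
      · by_cases hc2 : PySem.List.pyGet? cs j = some ')'
        · rw [if_neg hc1, if_pos hc2, if_neg hc1, if_pos hc2]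
          rw [if_neg (show ¬ (d + 1 - 1 = 0) by omega), if_pos (show (1:Int) - 1 = 0 by norm_num)]
          have : d + 1 - 1 = d := by ring
          rw [this]
        · rw [if_neg hc1, if_neg hc2, if_neg hc1, if_neg hc2]
          exact ih (j + 1) d h1 hd
    · rw [pvALoop_stop cs j (d + 1) hj, pvALoop_stop cs j 1 hj, pvALoop_stop cs j d hj]

-- B's loop (with enough fuel) computes A's loop at depth 1
theorem pvAltLoop_eq (cs : List Char) (n : Nat) :
    ∀ (j : Int) (fuel : Nat), (↑cs.length - j).toNat ≤ n →
      2 * (↑cs.length - j).toNat + 2 ≤ fuel →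
      pvAltLoop cs fuel j = pvALoop cs j 1 := by
  induction n with
  | zero =>
    intro j fuel h hf
    obtain ⟨f, rfl⟩ : ∃ f, fuel = f + 1 := ⟨fuel - 1, by omega⟩
    have hj : ¬ j < (cs.length : Int) := by omega
    rw [pvAltLoop_step, if_neg hj, pvALoop_stop cs j 1 hj]
  | succ n ih =>
    intro j fuel h hf
    obtain ⟨f, rfl⟩ : ∃ f, fuel = f + 1 := ⟨fuel - 1, by omega⟩
    by_cases hj : j < (cs.length : Int)
    · have htn : 1 ≤ (↑cs.length - j).toNat := by omega
      have h1 : (↑cs.length - (j + 1)).toNat = (↑cs.length - j).toNat - 1 := by omega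
      rw [pvAltLoop_step, if_pos hj, pvALoop_step cs j 1 hj]
      by_cases hc2 : PySem.List.pyGet? cs j = some ')'
      · rw [if_pos hc2]
        by_cases hc1 : PySem.List.pyGet? cs j = some '('
        · exact absurd (hc1.symm.trans hc2) (by simp)
        · rw [if_neg hc1, if_pos hc2, if_pos (show (1:Int) - 1 = 0 by norm_num)]
      · by_cases hc1 : PySem.List.pyGet? cs j = some '('
        · rw [if_neg hc2, if_pos hc1, if_pos hc1]
          obtain ⟨f', rfl⟩ : ∃ f', f = f' + 1 := ⟨f - 1, by omega⟩
          have hgo : pvAltGo cs (f' + 1) j = pvAltLoop cs f' (j + 1) := by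
            rw [pvAltGo_step, if_neg (by omega), if_pos hc1]
          have hin : pvAltLoop cs f' (j + 1) = pvALoop cs (j + 1) 1 :=
            ih (j + 1) f' (by omega) (by omega)
          rw [hgo, hin]
          have hk : j + 1 ≤ pvALoop cs (j + 1) 1 := pvALoop_ge' cs (j + 1) 1
          have hout : pvAltLoop cs (f' + 1) (pvALoop cs (j + 1) 1) =
              pvALoop cs (pvALoop cs (j + 1) 1) 1 :=
            ih (pvALoop cs (j + 1) 1) (f' + 1) (by omega) (by omega)
          rw [hout]
          exact (pvALoop_key cs (↑cs.length - (j + 1)).toNat (j + 1) 1 (le_refl _)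
            (by omega)).symm
        · rw [if_neg hc2, if_neg hc1, if_neg hc1, if_neg hc2]
          exact ih (j + 1) f (by omega) (by omega)
    · rw [pvAltLoop_step, if_neg hj, pvALoop_stop cs j 1 hj]

-- ===== VERDICT (by name: the statement is the Claim_ definition above) =====
theorem skip_parens_spec : Claim_equal_skip_parens := by
  intro s i _hDom hPre
  show skip_parens s i = skip_parens_alt s i
  have hPre' : -(s.toList.length : Int) ≤ i := by
    unfold Pre_skip_parens at hPre
    simpa [PySem.Str.len_eq] using hPre
  have hA : skip_parens s i =
      (if ((s.toList.length : Int)) ≤ i then i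
       else match PySem.List.pyGet? s.toList i with
        | some '(' => pvALoop s.toList i 0
        | _ => i) := rfl
  have hB : skip_parens_alt s i = pvAltGo s.toList (4 * s.toList.length + 8) i := rfl
  rw [hA, hB]
  obtain ⟨m, hm⟩ : ∃ m, 4 * s.toList.length + 8 = m + 1 := ⟨4 * s.toList.length + 7, by omega⟩
  rw [hm, pvAltGo_step]
  by_cases hge : (s.toList.length : Int) ≤ i
  · rw [if_pos hge, if_pos hge]
  · rw [if_neg hge, if_neg hge]
    have hlt : i < (s.toList.length : Int) := by omega
    cases hc : PySem.List.pyGet? s.toList i with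
    | none =>
      exfalso
      rw [PySem.List.pyGet?_eq_none_iff] at hc
      exact hc (by unfold PySem.Raise.InRange; omega)
    | some c =>
      by_cases hop : c = '('
      · subst hop
        rw [if_pos rfl]
        show pvALoop s.toList i 0 = pvAltLoop s.toList m (i + 1)
        rw [pvALoop_step s.toList i 0 hlt, if_pos hc]
        rw [show (0 : Int) + 1 = 1 by norm_num]
        exact (pvAltLoop_eq s.toList (↑s.toList.length - (i + 1)).toNat (i + 1) m
          (le_refl _) (by omega)).symm
      · rw [if_neg (show ¬ (some c = some '(') from fun h => hop (Option.some.inj h))]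
        split
        · rename_i heq
          exact absurd (Option.some.inj heq) hop
        · rfl
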